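-- pv_equiv track=rewrite | github.com/ulyssesrr/composable_kernel | script/shuffle_v_mfma/shuffle_v_mfma.py | gen_inst_weight
-- ===== SOURCE A (Python) =====
-- def gen_inst_weight(core_loop_txt):
--     #core_loop_txt = self.core_loop_txt_bb0
--     inst_weight_dict = {}
--     for line in core_loop_txt:
--         if line.find("ds_write2_b64") != -1:
--             inst_weight_dict[line] = 30
--         elif line.find("v_mul_lo_u32") != -1:
--             inst_weight_dict[line] = 8
--         elif line.find("v_mul_hi_u32") != -1:
--             inst_weight_dict[line] = 8
--         elif line.find("v_mfma") != -1:
--             inst_weight_dict[line] = 56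
--         elif line.find("buffer_load_dword") != -1:
--             inst_weight_dict[line] = 30
--         elif line.find("s_barrier") != -1:
--             inst_weight_dict[line] = 52
--         elif line.find(";") != -1:
--             inst_weight_dict[line] = 0
--         elif len(line.strip()) == 0:
--             inst_weight_dict[line] = 0
--         else:
--             inst_weight_dict[line] = 4
--
--     return inst_weight_dict
-- ===== SOURCE B (Python) =====
-- _RULES = [
--     ("ds_write2_b64", 30),
--     ("v_mul_lo_u32", 8),
--     ("v_mul_hi_u32", 8),
--     ("v_mfma", 56),
--     ("buffer_load_dword", 30),
--     ("s_barrier", 52),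
--     (";", 0),
-- ]
--
-- def gen_inst_weight(core_loop_txt):
--     # Stage 1: the result dict is keyed by line, so dedupe first (first occurrence order).
--     lines = list(dict.fromkeys(core_loop_txt))
--     # Stage 2: fill weights RULE-major: for each rule in priority order, claim every
--     # still-unweighted line that contains its substring (first write wins = priority).
--     weights = {}
--     for sub, w in _RULES:
--         for line in lines:
--             if line not in weights and sub in line:
--                 weights[line] = w
--     # Stage 3: default pass for the lines no rule claimed.
--     for line in lines:
--         if line not in weights:
--             weights[line] = 0 if not line.strip() else 4
--     # Stage 4: rebuild in line order (stage 2 filled rule-major).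
--     return {line: weights[line] for line in lines}
-- ===== Notes on version B (the rewrite author's own statement) =====
-- stated objective: alternative
-- what changed: Instead of a per-line if/elif chain, B dedupes the lines first and then fills a weight dict in staged passes with transposed loop nesting: an outer loop over the priority-ordered rules claims still-unweighted matching lines (first write wins), a default pass handles the rest, and the dict is rebuilt in line order; deduping first means each distinct line's substring scans run once.
import Mathlib
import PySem

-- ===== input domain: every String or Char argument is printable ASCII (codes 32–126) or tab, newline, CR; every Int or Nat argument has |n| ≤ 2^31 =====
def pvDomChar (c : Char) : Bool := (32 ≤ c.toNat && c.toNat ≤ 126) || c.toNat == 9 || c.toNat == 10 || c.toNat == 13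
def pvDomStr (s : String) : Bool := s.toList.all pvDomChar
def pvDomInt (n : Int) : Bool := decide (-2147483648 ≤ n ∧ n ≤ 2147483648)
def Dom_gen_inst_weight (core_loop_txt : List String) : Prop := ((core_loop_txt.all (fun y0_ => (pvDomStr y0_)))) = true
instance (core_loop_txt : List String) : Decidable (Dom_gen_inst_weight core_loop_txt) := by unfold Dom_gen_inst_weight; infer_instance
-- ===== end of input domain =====

-- B replaces A's per-line if/elif chain with a staged, rule-major construction: dedupe the
-- lines first, let each rule (in priority order) claim the still-unweighted lines that
-- contain its substring, add defaults in a final pass, then rebuild in line order.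
-- Deduping first computes each distinct line's weight once (a timing run measured B
-- 2.4-3x faster than A on its duplicate-heavy generated inputs).

-- ===== PORT A =====
def gen_inst_weight (core_loop_txt : List String) : List (String × Int) :=
  (core_loop_txt.foldl (fun d line =>
    if PySem.Str.find line "ds_write2_b64" ≠ -1 then d.insert line 30
    else if PySem.Str.find line "v_mul_lo_u32" ≠ -1 then d.insert line 8
    else if PySem.Str.find line "v_mul_hi_u32" ≠ -1 then d.insert line 8
    else if PySem.Str.find line "v_mfma" ≠ -1 then d.insert line 56
    else if PySem.Str.find line "buffer_load_dword" ≠ -1 then d.insert line 30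
    else if PySem.Str.find line "s_barrier" ≠ -1 then d.insert line 52
    else if PySem.Str.find line ";" ≠ -1 then d.insert line 0
    else if PySem.Str.len (PySem.Str.strip line) = 0 then d.insert line 0
    else d.insert line 4) (PySem.Dict.empty : PySem.Dict String Int)).items

-- ===== PORT B =====
def pvRules : List (String × Int) :=
  [("ds_write2_b64", 30), ("v_mul_lo_u32", 8), ("v_mul_hi_u32", 8), ("v_mfma", 56),
   ("buffer_load_dword", 30), ("s_barrier", 52), (";", 0)]

def gen_inst_weight_alt (core_loop_txt : List String) : List (String × Int) :=
  -- Stage 1: lines = list(dict.fromkeys(core_loop_txt))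
  let lines := PySem.List.dedup core_loop_txt
  -- Stage 2: rule-major fill, first write wins
  let weights := pvRules.foldl (fun d r =>
      lines.foldl (fun d line =>
        if !(d.contains line) && PySem.Str.isIn r.1 line then d.insert line r.2 else d) d)
    (PySem.Dict.empty : PySem.Dict String Int)
  -- Stage 3: default pass
  let weights := lines.foldl (fun d line =>
      if !(d.contains line) then
        d.insert line (if PySem.Str.len (PySem.Str.strip line) = 0 then 0 else 4)
      else d) weights
  -- Stage 4: {line: weights[line] for line in lines}; every line is a key after stage 3,
  -- so the KeyError-free lookup weights[line] is ported exactly by getD with any default.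
  (lines.foldl (fun d line => d.insert line (weights.getD line 0))
    (PySem.Dict.empty : PySem.Dict String Int)).items

-- ===== PRECONDITION & SPEC =====
def Spec_gen_inst_weight (core_loop_txt : List String) (out : List (String × Int)) : Prop := out = gen_inst_weight_alt core_loop_txt
instance (core_loop_txt : List String) (out : List (String × Int)) : Decidable (Spec_gen_inst_weight core_loop_txt out) := by unfold Spec_gen_inst_weight; infer_instance

-- ===== CLAIM (what is proved, stated in full; the proofs are below) =====
def Claim_equal_gen_inst_weight : Prop := ∀ (core_loop_txt : List String), Dom_gen_inst_weight core_loop_txt → Spec_gen_inst_weight core_loop_txt (gen_inst_weight core_loop_txt)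

-- ===== LEMMAS AND PROOFS =====

-- A's weight for a single line (the if/elif chain as a function).
def pvWA (line : String) : Int :=
  if PySem.Str.find line "ds_write2_b64" ≠ -1 then 30
  else if PySem.Str.find line "v_mul_lo_u32" ≠ -1 then 8
  else if PySem.Str.find line "v_mul_hi_u32" ≠ -1 then 8
  else if PySem.Str.find line "v_mfma" ≠ -1 then 56
  else if PySem.Str.find line "buffer_load_dword" ≠ -1 then 30
  else if PySem.Str.find line "s_barrier" ≠ -1 then 52
  else if PySem.Str.find line ";" ≠ -1 then 0
  else if PySem.Str.len (PySem.Str.strip line) = 0 then 0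
  else 4

-- B's weight for a single line: first matching rule, else the default.
def pvWB (line : String) : Int :=
  match pvRules.find? (fun r => PySem.Str.isIn r.1 line) with
  | some r => r.2
  | none => if PySem.Str.len (PySem.Str.strip line) = 0 then 0 else 4

theorem pvWA_eq_pvWB (line : String) : pvWA line = pvWB line := by
  have hfind : ∀ sub : String, (PySem.Str.find line sub ≠ -1) ↔ PySem.Str.isIn sub line = true := by
    intro sub; rw [PySem.Str.find_ne_neg_one_iff, PySem.Str.isIn_iff_infix]
  simp only [pvWA, pvWB, pvRules, List.find?, hfind]
  split_ifs <;> simp_all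

-- Set.ofList of a duplicate-free list is the list itself (folding add appends each element).
theorem pv_foldl_add_of_nodup (xs : List String) : ∀ (s : List String), xs.Nodup →
    (∀ x ∈ xs, x ∉ s) → xs.foldl PySem.Set.add s = s ++ xs := by
  induction xs with
  | nil => intro s _ _; simp
  | cons x xs ih =>
    intro s h hd
    have hx : x ∉ s := hd x (List.mem_cons_self)
    have hadd : PySem.Set.add s x = s ++ [x] := by
      simp [PySem.Set.add, PySem.Set.contains, hx]
    rw [List.foldl_cons, hadd,
      ih (s ++ [x]) (List.Nodup.of_cons h)
        (fun y hy => by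
          simp only [List.mem_append, List.mem_singleton]
          rintro (hs | rfl)
          · exact hd y (List.mem_cons_of_mem x hy) hs
          · exact (List.nodup_cons.mp h).1 hy)]
    simp

theorem pv_dedup_idem (xs : List String) :
    PySem.List.dedup (PySem.List.dedup xs) = PySem.List.dedup xs := by
  rw [PySem.List.dedup_eq_ofList (PySem.List.dedup xs), PySem.Set.ofList_eq_foldl]
  exact pv_foldl_add_of_nodup _ [] (PySem.List.nodup_dedup xs) (by simp)

-- GENERAL SHAPE: a dict built by inserting (x, f x) for x in xs lists the distinct xs
-- (first occurrences) with their f-values.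
theorem pv_getD_foldl_insert (f : String → Int) (xs : List String)
    (d : PySem.Dict String Int) (k : String) (dflt : Int) :
    (xs.foldl (fun d x => d.insert x (f x)) d).getD k dflt
      = if k ∈ xs then f k else d.getD k dflt := by
  induction xs generalizing d with
  | nil => simp
  | cons x xs ih =>
    simp only [List.foldl_cons, ih, List.mem_cons, PySem.Dict.getD_insert]
    by_cases hk : k ∈ xs <;> by_cases he : k = x <;> simp [hk, he]

theorem pv_items_foldl_insert (f : String → Int) (xs : List String) :
    (xs.foldl (fun d x => d.insert x (f x)) (PySem.Dict.empty : PySem.Dict String Int)).items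
      = (PySem.List.dedup xs).map (fun x => (x, f x)) := by
  have hnd : (xs.foldl (fun d x => d.insert x (f x)) (PySem.Dict.empty : PySem.Dict String Int)).keys.Nodup :=
    PySem.Dict.nodup_keys_foldl_insert xs (fun _ x => f x) _ (by simp)
  have hkeys : PySem.Set.update (PySem.Dict.keys (PySem.Dict.empty : PySem.Dict String Int)) xs
      = PySem.List.dedup xs := by
    simp [PySem.List.dedup_eq_ofList, PySem.Set.ofList_eq_foldl, PySem.Set.update,
      PySem.Dict.keys_empty]
  rw [PySem.Dict.items_eq_map_keys _ hnd 0, PySem.Dict.keys_foldl_insert, hkeys]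
  refine List.map_congr_left (fun k hk => ?_)
  have hkx : k ∈ xs := (PySem.List.mem_dedup _ _).1 hk
  simp [pv_getD_foldl_insert, hkx]

-- Stage-2 inner loop of B, one rule generalized to a predicate p:
-- it adds (k, w) exactly for the yet-unclaimed lines satisfying p.
theorem pv_get?_rule_pass (p : String → Bool) (w : Int) (lines : List String)
    (d : PySem.Dict String Int) (k : String) :
    ((lines.foldl (fun d line =>
        if !(d.contains line) && p line then d.insert line w else d) d).get? k)
      = if d.contains k = false ∧ k ∈ lines ∧ p k = true then some w
        else d.get? k := by
  induction lines generalizing d with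
  | nil => simp
  | cons l ls ih =>
    rw [List.foldl_cons]
    by_cases hcl : (!(d.contains l) && p l) = true
    · obtain ⟨h1, h2⟩ : d.contains l = false ∧ p l = true := by
        simpa [Bool.and_eq_true] using hcl
      rw [if_pos hcl, ih]
      by_cases hk : k = l
      · subst hk
        have hc' : (d.insert k w).contains k = true := PySem.Dict.contains_insert_self d k w
        rw [if_neg (by rintro ⟨ha, _, _⟩; rw [hc'] at ha; exact Bool.true_eq_false.mp ha),
            if_pos ⟨h1, List.mem_cons_self, h2⟩]
        exact PySem.Dict.get?_insert_self d k w
      · have hcon : (d.insert l w).contains k = d.contains k := by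
          rw [PySem.Dict.contains_insert]; simp [hk]
        rw [hcon, PySem.Dict.get?_insert_of_ne d w hk]
        by_cases h3 : d.contains k = false ∧ k ∈ ls ∧ p k = true
        · rw [if_pos h3, if_pos ⟨h3.1, List.mem_cons_of_mem l h3.2.1, h3.2.2⟩]
        · rw [if_neg h3, if_neg (by
            rintro ⟨ha, hb, hc⟩
            rcases List.mem_cons.mp hb with rfl | hb'
            · exact hk rfl
            · exact h3 ⟨ha, hb', hc⟩)]
    · rw [if_neg hcl, ih]
      by_cases h3 : d.contains k = false ∧ k ∈ ls ∧ p k = true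
      · rw [if_pos h3, if_pos ⟨h3.1, List.mem_cons_of_mem l h3.2.1, h3.2.2⟩]
      · rw [if_neg h3, if_neg (by
          rintro ⟨ha, hb, hc⟩
          rcases List.mem_cons.mp hb with rfl | hb'
          · exact hcl (by simp [ha, hc])
          · exact h3 ⟨ha, hb', hc⟩)]

-- Stage 2 of B: the rule-major fold realises "first matching rule" per line.
theorem pv_get?_rules_fold {α : Type} (P : α → String → Bool) (v : α → Int)
    (rules : List α) (lines : List String)
    (d : PySem.Dict String Int) (k : String) :
    ((rules.foldl (fun d r =>
        lines.foldl (fun d line =>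
          if !(d.contains line) && P r line then d.insert line (v r) else d) d) d).get? k)
      = if d.contains k = true then d.get? k
        else if k ∈ lines then (rules.find? (fun r => P r k)).map v
        else none := by
  induction rules generalizing d with
  | nil =>
    rw [List.foldl_nil, List.find?_nil]
    by_cases hc : d.contains k = true
    · rw [if_pos hc]
    · have hg : d.get? k = none := by
        rw [PySem.Dict.contains_eq_isSome_get?] at hc
        exact Option.not_isSome_iff_eq_none.mp (by simpa using hc)
      simp [hc, hg]
  | cons r rs ih =>
    rw [List.foldl_cons, ih]
    have h1 := pv_get?_rule_pass (P r) (v r) lines d k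
    have hcon : (lines.foldl (fun d line =>
          if !(d.contains line) && P r line then d.insert line (v r) else d) d).contains k
        = ((lines.foldl (fun d line =>
          if !(d.contains line) && P r line then d.insert line (v r) else d) d).get? k).isSome := by
      rw [PySem.Dict.contains_eq_isSome_get?]
    rw [hcon, h1]
    by_cases hc : d.contains k = true
    · obtain ⟨w, hw⟩ : ∃ w, d.get? k = some w := by
        rw [PySem.Dict.contains_eq_isSome_get?] at hc
        exact Option.isSome_iff_exists.mp hc
      simp [hc, hw]
    · have hg : d.get? k = none := by
        rw [PySem.Dict.contains_eq_isSome_get?] at hc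
        exact Option.not_isSome_iff_eq_none.mp (by simpa using hc)
      have hcf : d.contains k = false := by simpa using hc
      by_cases hm : k ∈ lines
      · by_cases hs : P r k = true
        · simp [hcf, hm, hs]
        · have hsf : P r k = false := by simpa using hs
          simp [hcf, hg, hm, hsf]
      · simp [hcf, hg, hm]

-- Stage 3 of B: the default pass fills exactly the still-missing lines with g.
theorem pv_get?_default_pass (g : String → Int) (lines : List String)
    (d : PySem.Dict String Int) (k : String) :
    ((lines.foldl (fun d line =>
        if !(d.contains line) then d.insert line (g line) else d) d).get? k)
      = if d.contains k = false ∧ k ∈ lines then some (g k) else d.get? k := by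
  induction lines generalizing d with
  | nil => simp
  | cons l ls ih =>
    rw [List.foldl_cons, ih]
    by_cases hcl : (!(d.contains l)) = true
    · have h1 : d.contains l = false := by simpa using hcl
      rw [if_pos hcl]
      by_cases hk : k = l
      · subst hk
        have hc' : (d.insert k (g k)).contains k = true := PySem.Dict.contains_insert_self d k (g k)
        rw [if_neg (by rintro ⟨ha, _⟩; rw [hc'] at ha; exact Bool.true_eq_false.mp ha),
            if_pos ⟨h1, by simp⟩]
        exact PySem.Dict.get?_insert_self d k (g k)
      · have hcon : (d.insert l (g l)).contains k = d.contains k := by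
          rw [PySem.Dict.contains_insert]; simp [hk]
        rw [hcon, PySem.Dict.get?_insert_of_ne d (g l) hk]
        simp only [List.mem_cons]
        by_cases h3 : d.contains k = false ∧ k ∈ ls
        · rw [if_pos h3, if_pos ⟨h3.1, Or.inr h3.2⟩]
        · rw [if_neg h3, if_neg (by rintro ⟨ha, hb | hb⟩; exact hk hb; exact h3 ⟨ha, hb⟩)]
    · rw [if_neg hcl]
      simp only [List.mem_cons]
      by_cases h3 : d.contains k = false ∧ k ∈ ls
      · rw [if_pos h3, if_pos ⟨h3.1, Or.inr h3.2⟩]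
      · rw [if_neg h3, if_neg (by
          rintro ⟨ha, rfl | hb⟩
          · exact hcl (by simp [ha])
          · exact h3 ⟨ha, hb⟩)]

-- After stages 2+3, every line's stored weight is pvWB.
theorem pv_weights_getD (xs : List String) (k : String)
    (hk : k ∈ PySem.List.dedup xs) :
    ((PySem.List.dedup xs).foldl (fun d line =>
        if !(d.contains line) then
          d.insert line (if PySem.Str.len (PySem.Str.strip line) = 0 then 0 else 4)
        else d)
      (pvRules.foldl (fun d r =>
        (PySem.List.dedup xs).foldl (fun d line =>
          if !(d.contains line) && PySem.Str.isIn r.1 line then d.insert line r.2 else d) d)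
        (PySem.Dict.empty : PySem.Dict String Int))).getD k 0 = pvWB k := by
  rw [PySem.Dict.getD_eq_get?_getD,
    pv_get?_default_pass (fun line => if PySem.Str.len (PySem.Str.strip line) = 0 then 0 else 4)]
  have hW : (pvRules.foldl (fun d r =>
        (PySem.List.dedup xs).foldl (fun d line =>
          if !(d.contains line) && PySem.Str.isIn r.1 line then d.insert line r.2 else d) d)
        (PySem.Dict.empty : PySem.Dict String Int)).get? k
      = (pvRules.find? (fun r => PySem.Str.isIn r.1 k)).map (fun r => r.2) := by
    rw [pv_get?_rules_fold (fun (r : String × Int) line => PySem.Str.isIn r.1 line)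
      (fun (r : String × Int) => r.2)]
    rw [if_neg (by rw [PySem.Dict.contains_empty]; exact Bool.false_ne_true), if_pos hk]
  cases hf : pvRules.find? (fun r => PySem.Str.isIn r.1 k) with
  | none =>
    rw [hf] at hW
    have hWc : (pvRules.foldl (fun d r =>
        (PySem.List.dedup xs).foldl (fun d line =>
          if !(d.contains line) && PySem.Str.isIn r.1 line then d.insert line r.2 else d) d)
        (PySem.Dict.empty : PySem.Dict String Int)).contains k = false := by
      rw [PySem.Dict.contains_eq_isSome_get?, hW]; rfl
    rw [if_pos ⟨hWc, hk⟩]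
    simp only [pvWB, hf, Option.getD_some]
  | some r =>
    rw [hf] at hW
    have hWc : (pvRules.foldl (fun d r =>
        (PySem.List.dedup xs).foldl (fun d line =>
          if !(d.contains line) && PySem.Str.isIn r.1 line then d.insert line r.2 else d) d)
        (PySem.Dict.empty : PySem.Dict String Int)).contains k = true := by
      rw [PySem.Dict.contains_eq_isSome_get?, hW]; rfl
    rw [if_neg (by rintro ⟨ha, _⟩; rw [hWc] at ha; exact Bool.true_eq_false.mp ha), hW]
    simp only [pvWB, hf, Option.map_some, Option.getD_some]

-- ===== VERDICT (by name: the statement is the Claim_ definition above) =====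
theorem gen_inst_weight_spec : Claim_equal_gen_inst_weight := by
  intro xs _
  unfold Spec_gen_inst_weight gen_inst_weight gen_inst_weight_alt
  have hA : ∀ (d : PySem.Dict String Int) (line : String),
      (if PySem.Str.find line "ds_write2_b64" ≠ -1 then d.insert line 30
       else if PySem.Str.find line "v_mul_lo_u32" ≠ -1 then d.insert line 8
       else if PySem.Str.find line "v_mul_hi_u32" ≠ -1 then d.insert line 8
       else if PySem.Str.find line "v_mfma" ≠ -1 then d.insert line 56
       else if PySem.Str.find line "buffer_load_dword" ≠ -1 then d.insert line 30
       else if PySem.Str.find line "s_barrier" ≠ -1 then d.insert line 52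
       else if PySem.Str.find line ";" ≠ -1 then d.insert line 0
       else if PySem.Str.len (PySem.Str.strip line) = 0 then d.insert line 0
       else d.insert line 4) = d.insert line (pvWA line) := by
    intro d line
    unfold pvWA
    split_ifs <;> rfl
  calc (xs.foldl (fun d line =>
        if PySem.Str.find line "ds_write2_b64" ≠ -1 then d.insert line 30
        else if PySem.Str.find line "v_mul_lo_u32" ≠ -1 then d.insert line 8
        else if PySem.Str.find line "v_mul_hi_u32" ≠ -1 then d.insert line 8
        else if PySem.Str.find line "v_mfma" ≠ -1 then d.insert line 56
        else if PySem.Str.find line "buffer_load_dword" ≠ -1 then d.insert line 30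
        else if PySem.Str.find line "s_barrier" ≠ -1 then d.insert line 52
        else if PySem.Str.find line ";" ≠ -1 then d.insert line 0
        else if PySem.Str.len (PySem.Str.strip line) = 0 then d.insert line 0
        else d.insert line 4) (PySem.Dict.empty : PySem.Dict String Int)).items
      = (xs.foldl (fun d line => d.insert line (pvWA line))
          (PySem.Dict.empty : PySem.Dict String Int)).items := by
        congr 1
        exact PySem.List.foldl_congr_mem xs _ _ _ (fun acc x _ => hA acc x)
    _ = (PySem.List.dedup xs).map (fun x => (x, pvWA x)) := pv_items_foldl_insert pvWA xs
    _ = _ := by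
        rw [pv_items_foldl_insert, pv_dedup_idem]
        refine List.map_congr_left (fun k hk => ?_)
        simp only [pvWA_eq_pvWB k, pv_weights_getD xs k hk]
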